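-- pv_equiv track=rewrite | github.com/gsaltintas/sudoku | sudoku.py | find_min_key
-- ===== SOURCE A (Python) =====
-- def find_min_key(d: dict):
--     min_key = list(d.keys())[0]
--     min_size = len(d[min_key])
--     for key in d.keys():
--         if len(d[key]) < min_size:
--             min_key = key
--             min_size = len(d[key])
--     return min_key
-- ===== SOURCE B (Python) =====
-- def find_min_key(d: dict):
--     # sort keys by value length (stable), take the first
--     return sorted(d, key=lambda k: len(d[k]))[0]
-- ===== Notes on version B (the rewrite author's own statement) =====
-- stated objective: idiomatic
-- what changed: Replaces the manual min-scan with explicit (min_key, min_size) state by a stable sort of the keys on value length followed by taking the first key; stability preserves A's first-on-tie choice.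
import Mathlib
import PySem

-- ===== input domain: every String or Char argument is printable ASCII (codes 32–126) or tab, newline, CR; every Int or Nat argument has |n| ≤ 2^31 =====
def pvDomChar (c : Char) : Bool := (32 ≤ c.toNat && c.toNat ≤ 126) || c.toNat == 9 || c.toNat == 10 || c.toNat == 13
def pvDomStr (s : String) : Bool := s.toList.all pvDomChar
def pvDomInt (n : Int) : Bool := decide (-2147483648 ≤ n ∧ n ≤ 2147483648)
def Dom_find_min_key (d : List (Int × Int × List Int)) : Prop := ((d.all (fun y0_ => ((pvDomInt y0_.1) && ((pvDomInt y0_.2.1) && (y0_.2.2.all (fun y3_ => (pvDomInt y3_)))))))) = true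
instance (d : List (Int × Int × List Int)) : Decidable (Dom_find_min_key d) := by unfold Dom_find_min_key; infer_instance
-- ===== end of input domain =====

-- B replaces A's manual min-scan with a stable sort of the keys on value length and takes the
-- first key (idiomatic sort-then-pick; stability preserves A's first-on-tie choice).

-- the dict argument ((r,c) ↦ cell list) as a PySem.Dict (shared reshaping of the input, used by both ports)
def pvDict (d : List (Int × Int × List Int)) : PySem.Dict (Int × Int) (List Int) :=
  PySem.Dict.ofList (d.map (fun e => ((e.1, e.2.1), e.2.2)))

-- ===== PORT A =====
def find_min_key (d : List (Int × Int × List Int)) : Int × Int :=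
  let dd := pvDict d
  let ks := dd.keys
  -- min_key = list(d.keys())[0]   (IndexError on empty dict: excluded by Pre_)
  let min_key := PySem.List.pyGetD ks 0 (0, 0)
  -- min_size = len(d[min_key])
  let min_size : Int := ((dd.getD min_key []).length : Int)
  -- for key in d.keys(): if len(d[key]) < min_size: min_key = key; min_size = len(d[key])
  (ks.foldl
    (fun p k =>
      if ((dd.getD k []).length : Int) < p.2 then (k, ((dd.getD k []).length : Int)) else p)
    (min_key, min_size)).1

-- ===== PORT B =====
def find_min_key_alt (d : List (Int × Int × List Int)) : Int × Int :=
  let dd := pvDict d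
  -- sorted(d, key=lambda k: len(d[k]))[0]
  PySem.List.pyGetD
    (PySem.List.sorted dd.keys (fun k => ((dd.getD k []).length : Int))) 0 (0, 0)

-- ===== PRECONDITION & SPEC =====
-- A raises IndexError on the empty dict (list(d.keys())[0]); B raises there too.
def Pre_find_min_key (d : List (Int × Int × List Int)) : Prop := d ≠ []
instance (d : List (Int × Int × List Int)) : Decidable (Pre_find_min_key d) := by
  unfold Pre_find_min_key; infer_instance

def pvWitness_find_min_key : (List (Int × Int × List Int)) := [(0, 1, [2])]

def Spec_find_min_key (d : List (Int × Int × List Int)) (out : Int × Int) : Prop := out = find_min_key_alt d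
instance (d : List (Int × Int × List Int)) (out : Int × Int) : Decidable (Spec_find_min_key d out) := by unfold Spec_find_min_key; infer_instance

-- ===== CLAIM (what is proved, stated in full; the proofs are below) =====
def Claim_equal_find_min_key : Prop := ∀ (d : List (Int × Int × List Int)), Dom_find_min_key d → Pre_find_min_key d → Spec_find_min_key d (find_min_key d)

-- ===== LEMMAS AND PROOFS =====

-- the common "first key of minimal value-length" scan both programs compute
def pvScan (f : Int × Int → Int) (m : Int × Int) (t : List (Int × Int)) : Int × Int :=
  t.foldl (fun m k => if f k < f m then k else m) m

-- A's paired fold carries (key, size) with size = f key invariantly; its key component is pvScan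
theorem pvFoldPair (f : Int × Int → Int) :
    ∀ (t : List (Int × Int)) (m : Int × Int),
      t.foldl (fun p k => if f k < p.2 then (k, f k) else p) (m, f m)
        = (pvScan f m t, f (pvScan f m t)) := by
  intro t
  induction t with
  | nil => intro m; simp [pvScan]
  | cons x xs ih =>
    intro m
    simp only [pvScan, List.foldl_cons]
    by_cases h : f x < f m
    · simp [h, ih x, pvScan]
    · simp [h, ih m, pvScan]

-- head of insertBy into a nonempty accumulator
theorem pvHeadInsertBy (f : Int × Int → Int) (x y : Int × Int) (ys : List (Int × Int)) :
    (PySem.List.insertBy (fun a b => decide (f a < f b)) x (y :: ys)).head? =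
      some (if f x < f y then x else y) := by
  by_cases h : f x < f y
  · simp [PySem.List.insertBy, h]
  · simp [PySem.List.insertBy, h]

-- head of an insertion-sort fold over a nonempty accumulator is the strict-min scan from its head
theorem pvHeadFold (f : Int × Int → Int) :
    ∀ (t : List (Int × Int)) (acc : List (Int × Int)) (m : Int × Int),
      acc.head? = some m →
      (t.foldl (fun acc x => PySem.List.insertBy (fun a b => decide (f a < f b)) x acc) acc).head?
        = some (pvScan f m t) := by
  intro t
  induction t with
  | nil => intro acc m h; simpa [pvScan] using h
  | cons x xs ih =>
    intro acc m h
    obtain ⟨y, ys, rfl⟩ : ∃ y ys, acc = y :: ys := by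
      cases acc with
      | nil => simp at h
      | cons y ys => exact ⟨y, ys, rfl⟩
    have hy : y = m := by simpa using h
    subst hy
    simp only [List.foldl_cons, pvScan]
    by_cases hx : f x < f y
    · rw [ih _ x (by rw [pvHeadInsertBy]; simp [hx])]
      simp [pvScan, hx]
    · rw [ih _ y (by rw [pvHeadInsertBy]; simp [hx])]
      simp [pvScan, hx]

-- head of Python's stable sort (by key f) of a nonempty list is the strict-min scan
theorem pvHeadSorted (f : Int × Int → Int) (m : Int × Int) (t : List (Int × Int)) :
    (PySem.List.sorted (m :: t) f).head? = some (pvScan f m t) := by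
  rw [PySem.List.sorted_eq_foldl_insertBy]
  simp only [List.foldl_cons]
  exact pvHeadFold f t _ m (by simp [PySem.List.insertBy])

-- a nonempty input yields a nonempty key list
theorem pvKeysNe (d : List (Int × Int × List Int)) (h : d ≠ []) : (pvDict d).keys ≠ [] := by
  have : (pvDict d).keys = PySem.Set.ofList ((d.map (fun e => ((e.1, e.2.1), e.2.2))).map (·.1)) := by
    have hk := PySem.Dict.keys_foldl_insert_key (κ := Int × Int) (ν := List Int)
      (d.map (fun e => ((e.1, e.2.1), e.2.2))) (fun p => p.1) (fun _ p => p.2) PySem.Dict.empty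
    rw [pvDict, PySem.Dict.ofList, PySem.Dict.update]
    simpa [PySem.Set.update_nil_left] using hk
  rw [this]
  intro hnil
  cases d with
  | nil => exact h rfl
  | cons e es =>
    have : ((e.1, e.2.1), e.2.2).1 ∈ (PySem.Set.ofList
        (((e :: es).map (fun e => ((e.1, e.2.1), e.2.2))).map (·.1))) := by
      rw [PySem.Set.mem_ofList]; simp
    rw [hnil] at this
    simp at this

-- ===== VERDICT (by name: the statement is the Claim_ definition above) =====
theorem find_min_key_spec : Claim_equal_find_min_key := by
  intro d _ hpre
  unfold Spec_find_min_key find_min_key find_min_key_alt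
  obtain ⟨m, t, hks⟩ : ∃ m t, (pvDict d).keys = m :: t := by
    cases hk : (pvDict d).keys with
    | nil => exact absurd hk (pvKeysNe d hpre)
    | cons m t => exact ⟨m, t, rfl⟩
  set dd := pvDict d
  set f : Int × Int → Int := fun k => ((dd.getD k []).length : Int) with hf
  simp only [hks, PySem.List.pyGetD_zero_cons]
  -- B side: head of the sorted keys
  obtain ⟨hd, tl, hsorted⟩ : ∃ hd tl, PySem.List.sorted (m :: t) f = hd :: tl := by
    cases hs : PySem.List.sorted (m :: t) f with
    | nil => exact absurd ((PySem.List.sorted_eq_nil_iff _ _ _).mp hs) (by simp)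
    | cons hd tl => exact ⟨hd, tl, rfl⟩
  have hB : hd = pvScan f m t := by
    have := pvHeadSorted f m t
    rw [hsorted] at this
    simpa using this
  -- A side: the paired fold over m :: t starting at (m, f m)
  have hA : (m :: t).foldl (fun p k => if f k < p.2 then (k, f k) else p) (m, f m)
      = (pvScan f m t, f (pvScan f m t)) := by
    have := pvFoldPair f (m :: t) m
    simp only [List.foldl_cons, lt_irrefl] at this ⊢
    simpa [pvScan] using this
  simp only [hf] at hA
  rw [hA, hsorted, PySem.List.pyGetD_zero_cons, hB]
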